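-- pv_equiv track=rewrite | github.com/leharris3/nba-positions-videos-dataset | 4d-pose-extraction/PHALP/PHALP/scripts/run.py | calculate_indices
-- ===== SOURCE A (Python) =====
-- def calculate_indices(total_files, total_processes):
--     """Calculate the start and end indices for each process."""
--     files_per_process = total_files // total_processes
--     remainder = total_files % total_processes
--     indices = []
--
--     for process_num in range(total_processes):
--         start_idx = process_num * files_per_process
--         end_idx = (process_num + 1) * files_per_process
--         if process_num < remainder:
--             start_idx += process_num
--             end_idx += process_num + 1
--         else:
--             start_idx += remainder
--             end_idx += remainder
--         indices.append((start_idx, end_idx))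
--
--     return indices
-- ===== SOURCE B (Python) =====
-- def calculate_indices(total_files, total_processes):
--     """Calculate the start and end indices for each process."""
--     files_per_process = total_files // total_processes
--     remainder = total_files % total_processes
--     indices = []
--     start = 0
--     for i in range(total_processes):
--         count = files_per_process + (1 if i < remainder else 0)
--         indices.append((start, start + count))
--         start += count
--     return indices
-- ===== Notes on version B (the rewrite author's own statement) =====
-- stated objective: alternative
-- what changed: B replaces A's per-index closed-form start/end arithmetic (process_num * files_per_process plus a remainder offset recomputed independently each iteration) with a single running start cursor: each iteration computes this process's count and advances the cursor, so each range is derived from the previous one.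
-- outside the precondition, e.g. on calculate_indices(10, 0): A raises ZeroDivisionError, B raises ZeroDivisionError
import Mathlib
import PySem

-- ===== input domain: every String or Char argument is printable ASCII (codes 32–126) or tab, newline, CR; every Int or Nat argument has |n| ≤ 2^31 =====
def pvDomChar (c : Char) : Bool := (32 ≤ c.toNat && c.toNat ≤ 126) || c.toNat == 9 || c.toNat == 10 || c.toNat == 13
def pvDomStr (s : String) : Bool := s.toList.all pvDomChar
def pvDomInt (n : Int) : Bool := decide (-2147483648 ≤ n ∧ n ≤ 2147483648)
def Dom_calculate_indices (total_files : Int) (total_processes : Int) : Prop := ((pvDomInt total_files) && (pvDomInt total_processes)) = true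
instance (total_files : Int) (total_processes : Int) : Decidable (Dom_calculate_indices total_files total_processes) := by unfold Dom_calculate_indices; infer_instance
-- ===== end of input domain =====

-- B computes each process's range from a running start cursor instead of A's per-index
-- closed-form arithmetic; same values, alternative decomposition.

-- ===== PORT A =====
def calculate_indices (total_files : Int) (total_processes : Int) : List (Int × Int) :=
  let files_per_process := PySem.Int.floordiv total_files total_processes
  let remainder := PySem.Int.mod total_files total_processes
  (PySem.List.pyRange 0 total_processes 1).foldl
    (fun indices process_num =>
      let start_idx := process_num * files_per_process
      let end_idx := (process_num + 1) * files_per_process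
      if process_num < remainder then
        indices ++ [(start_idx + process_num, end_idx + process_num + 1)]
      else
        indices ++ [(start_idx + remainder, end_idx + remainder)]) []

-- ===== PORT B =====
def calculate_indices_alt (total_files : Int) (total_processes : Int) : List (Int × Int) :=
  let files_per_process := PySem.Int.floordiv total_files total_processes
  let remainder := PySem.Int.mod total_files total_processes
  ((PySem.List.pyRange 0 total_processes 1).foldl
    (fun (st : Int × List (Int × Int)) i =>
      let count := files_per_process + (if i < remainder then 1 else 0)
      (st.1 + count, st.2 ++ [(st.1, st.1 + count)])) (0, [])).2

-- ===== PRECONDITION & SPEC =====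
-- Pre_ excludes total_processes = 0, on which the Python A raises ZeroDivisionError.
def Pre_calculate_indices (total_files : Int) (total_processes : Int) : Prop := total_processes ≠ 0
instance (total_files : Int) (total_processes : Int) : Decidable (Pre_calculate_indices total_files total_processes) := by unfold Pre_calculate_indices; infer_instance
def pvWitness_calculate_indices : Int × Int := (10, 3)

def Spec_calculate_indices (total_files : Int) (total_processes : Int) (out : List (Int × Int)) : Prop := out = calculate_indices_alt total_files total_processes
instance (total_files : Int) (total_processes : Int) (out : List (Int × Int)) : Decidable (Spec_calculate_indices total_files total_processes out) := by unfold Spec_calculate_indices; infer_instance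

-- ===== CLAIM (what is proved, stated in full; the proofs are below) =====
def Claim_equal_calculate_indices : Prop := ∀ (total_files : Int) (total_processes : Int), Dom_calculate_indices total_files total_processes → Pre_calculate_indices total_files total_processes → Spec_calculate_indices total_files total_processes (calculate_indices total_files total_processes)

-- ===== LEMMAS AND PROOFS =====

-- Invariant over the first n iterations: B's cursor equals n*fpp + min n r, and the
-- two accumulated lists coincide.
theorem calc_indices_invariant (fpp r : Int) (hr : 0 ≤ r) (n : ℕ) :
    ((PySem.List.pyRange 0 n 1).foldl
      (fun (st : Int × List (Int × Int)) i =>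
        (st.1 + (fpp + (if i < r then 1 else 0)),
         st.2 ++ [(st.1, st.1 + (fpp + (if i < r then 1 else 0)))])) (0, []))
    = ((n : Int) * fpp + min (n : Int) r,
       (PySem.List.pyRange 0 n 1).foldl
        (fun indices process_num =>
          let start_idx := process_num * fpp
          let end_idx := (process_num + 1) * fpp
          if process_num < r then
            indices ++ [(start_idx + process_num, end_idx + process_num + 1)]
          else
            indices ++ [(start_idx + r, end_idx + r)]) []) := by
  induction n with
  | zero => simp; omega
  | succ m ih =>
    have hstep : PySem.List.pyRange 0 (((m : ℕ) + 1 : ℕ) : Int) 1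
        = PySem.List.pyRange 0 (m : ℕ) 1 ++ [(m : Int)] := by
      have := PySem.List.pyRange_one_succ_right (a := 0) (b := (m : ℕ)) (by positivity)
      simpa [add_comm] using this
    push_cast at hstep ⊢
    rw [hstep, List.foldl_append, List.foldl_append, ih]
    simp only [List.foldl_cons, List.foldl_nil]
    by_cases h : (m : Int) < r
    · have h1 : min (m : Int) r = m := by omega
      have h2 : min ((m : Int) + 1) r = (m : Int) + 1 := by omega
      simp only [if_pos h, h1, h2, Prod.mk.injEq]
      exact ⟨by ring, by rw [show (m : Int) * fpp + m + (fpp + 1) = ((m : Int) + 1) * fpp + m + 1 from by ring]⟩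
    · have h1 : min (m : Int) r = r := by omega
      have h2 : min ((m : Int) + 1) r = r := by omega
      simp only [if_neg h, h1, h2, Prod.mk.injEq]
      exact ⟨by ring, by rw [show (m : Int) * fpp + r + (fpp + 0) = ((m : Int) + 1) * fpp + r from by ring]⟩

-- ===== VERDICT (by name: the statement is the Claim_ definition above) =====
theorem calculate_indices_spec : Claim_equal_calculate_indices := by
  intro tf tp _ hpre
  simp only [Spec_calculate_indices, calculate_indices, calculate_indices_alt]
  by_cases htp : 0 < tp
  · have hr : 0 ≤ PySem.Int.mod tf tp := by
      have := PySem.Int.mod_eq_emod_of_pos (a := tf) htp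
      rw [this]; exact Int.emod_nonneg tf (by omega)
    have hcast : tp = ((tp.toNat : ℕ) : Int) := by omega
    rw [hcast] at hr ⊢
    rw [calc_indices_invariant _ _ hr tp.toNat]
  · have hemp : PySem.List.pyRange 0 tp 1 = [] := by
      rw [PySem.List.pyRange_one]
      have h0 : (tp - 0).toNat = 0 := by omega
      rw [h0]; simp
    rw [hemp]; simp
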